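-- pv_equiv track=rewrite | github.com/Priscasantos/LANDAGRI-B_Dashboard | dashboard/temporal.py | calculate_largest_consecutive_gap
-- ===== SOURCE A (Python) =====
-- def calculate_largest_consecutive_gap(anos_list):
--     """Calculate the largest consecutive gap in a list of years"""
--     if not isinstance(anos_list, list) or len(anos_list) < 2:
--         return 0
--     anos_list = sorted(set(anos_list))
--     max_gap = 0
--     for i in range(len(anos_list) - 1):
--         gap = anos_list[i + 1] - anos_list[i] - 1
--         if gap > max_gap:
--             max_gap = gap
--     return max_gap
-- ===== SOURCE B (Python) =====
-- def calculate_largest_consecutive_gap(anos_list):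
--     """Calculate the largest consecutive gap in a list of years"""
--     if not isinstance(anos_list, list) or len(anos_list) < 2:
--         return 0
--     return _gap_bisect(min(anos_list), max(anos_list), anos_list)
--
--
-- def _gap_bisect(lo, hi, vals):
--     """Largest run of missing integers strictly between members of vals,
--     where lo = min(vals) and hi = max(vals): bisect the value range,
--     partition vals around the midpoint, and combine the boundary gap with
--     the gaps of the two halves (no sorting)."""
--     if lo == hi:
--         return 0
--     mid = (lo + hi) // 2          # lo <= mid < hi
--     left = [v for v in vals if v <= mid]    # nonempty: contains lo
--     right = [v for v in vals if v > mid]    # nonempty: contains hi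
--     a = max(left)
--     b = min(right)
--     return max(b - a - 1, _gap_bisect(lo, a, left), _gap_bisect(b, hi, right))
-- ===== Notes on version B (the rewrite author's own statement) =====
-- stated objective: alternative
-- what changed: B never sorts and never deduplicates: it recursively bisects the value range [min,max], partitions the list around the midpoint, and combines the gap across the split with the recursive gaps of the two halves (divide-and-conquer over values, O(n log range), instead of A's sort-then-scan over adjacent pairs).
import Mathlib
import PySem

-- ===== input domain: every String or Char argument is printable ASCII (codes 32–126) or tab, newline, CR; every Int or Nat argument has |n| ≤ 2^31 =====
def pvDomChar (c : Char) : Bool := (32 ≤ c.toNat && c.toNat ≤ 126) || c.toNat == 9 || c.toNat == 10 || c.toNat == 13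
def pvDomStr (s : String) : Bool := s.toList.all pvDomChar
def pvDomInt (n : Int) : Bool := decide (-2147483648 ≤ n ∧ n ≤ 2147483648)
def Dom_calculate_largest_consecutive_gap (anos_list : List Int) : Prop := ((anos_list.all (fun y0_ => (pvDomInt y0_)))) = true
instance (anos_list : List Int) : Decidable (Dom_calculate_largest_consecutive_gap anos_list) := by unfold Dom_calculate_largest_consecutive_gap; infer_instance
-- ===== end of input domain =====

-- B replaces A's sort-then-scan by a divide-and-conquer bisection of the value range [min, max]
-- (no sorting, no deduplication): a genuinely different algorithm of comparable cost (objective: alternative).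

-- ===== PORT A =====
def calculate_largest_consecutive_gap (anos_list : List Int) : Int :=
  if anos_list.length < 2 then 0
  else
    let ys := PySem.List.sorted (PySem.Set.ofList anos_list) (fun x => x) false
    (PySem.List.pyRange 0 ((ys.length : Int) - 1) 1).foldl
      (fun max_gap i =>
        let gap := PySem.List.pyGetD ys (i + 1) 0 - PySem.List.pyGetD ys i 0 - 1
        if gap > max_gap then gap else max_gap) 0

-- ===== PORT B =====
-- _gap_bisect: Python tests 'lo == hi'; the port guards with 'hi ≤ lo' so the (unreachable)
-- case hi < lo is also total — on every reachable call lo = min(vals) ≤ max(vals) = hi.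
def gapBisect (lo hi : Int) (vals : List Int) : Int :=
  if hi ≤ lo then 0
  else
    let mid := PySem.Int.floordiv (lo + hi) 2
    let left := vals.filter fun v => decide (v ≤ mid)
    let right := vals.filter fun v => decide (mid < v)
    match h1 : PySem.List.max? left (fun y => y), h2 : PySem.List.min? right (fun y => y) with
    | some a, some b =>
        max (max (b - a - 1) (gapBisect lo a left)) (gapBisect b hi right)
    | _, _ => 0   -- Python's max()/min() raise on []; unreachable here (lo ∈ left, hi ∈ right)
termination_by (hi - lo).toNat
decreasing_by
  · have ha := PySem.List.max?_mem h1
    simp only [left, List.mem_unattach, List.mem_filter, List.mem_attach, true_and,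
      decide_eq_true_eq] at ha
    obtain ⟨-, ha2⟩ := ha
    have hm : PySem.Int.floordiv (lo + hi) 2 < hi := by
      rw [PySem.Int.floordiv_eq_ediv_of_pos (by norm_num)]
      omega
    omega
  · have hb := PySem.List.min?_mem h2
    simp only [right, List.mem_unattach, List.mem_filter, List.mem_attach, true_and,
      decide_eq_true_eq] at hb
    obtain ⟨-, hb2⟩ := hb
    have hm : lo ≤ PySem.Int.floordiv (lo + hi) 2 := by
      rw [PySem.Int.floordiv_eq_ediv_of_pos (by norm_num)]
      omega
    omega

def calculate_largest_consecutive_gap_alt (anos_list : List Int) : Int :=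
  if anos_list.length < 2 then 0
  else
    match PySem.List.min? anos_list (fun y => y), PySem.List.max? anos_list (fun y => y) with
    | some lo, some hi => gapBisect lo hi anos_list
    | _, _ => 0   -- unreachable: the list is nonempty

-- ===== PRECONDITION & SPEC =====
def Spec_calculate_largest_consecutive_gap (anos_list : List Int) (out : Int) : Prop := out = calculate_largest_consecutive_gap_alt anos_list
instance (anos_list : List Int) (out : Int) : Decidable (Spec_calculate_largest_consecutive_gap anos_list out) := by unfold Spec_calculate_largest_consecutive_gap; infer_instance

-- ===== CLAIM (what is proved, stated in full; the proofs are below) =====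
def Claim_equal_calculate_largest_consecutive_gap : Prop := ∀ (anos_list : List Int), Dom_calculate_largest_consecutive_gap anos_list → Spec_calculate_largest_consecutive_gap anos_list (calculate_largest_consecutive_gap anos_list)

-- ===== LEMMAS AND PROOFS =====

/-- running max over consecutive gaps, recursively -/
def gmRun (c : Int) : List Int → Int
  | a :: b :: t => gmRun (max c (b - a - 1)) (b :: t)
  | _ => c

/-- the list of consecutive gaps -/
def gaps : List Int → List Int
  | a :: b :: t => (b - a - 1) :: gaps (b :: t)
  | _ => []

/-- collapse adjacent equal elements (= dedup on a sorted list) -/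
def squash : List Int → List Int
  | a :: b :: t => if a = b then squash (b :: t) else a :: squash (b :: t)
  | l => l

theorem idx_foldl_eq_gmRun (l : List Int) (c : Int) :
    (List.range (l.length - 1)).foldl
      (fun m k => if l.getD (k + 1) 0 - l.getD k 0 - 1 > m then l.getD (k + 1) 0 - l.getD k 0 - 1 else m) c
    = gmRun c l := by
  induction l generalizing c with
  | nil => rfl
  | cons a t ih =>
    cases t with
    | nil => rfl
    | cons b u =>
      rw [show (a :: b :: u).length - 1 = u.length + 1 from rfl, List.range_succ_eq_map,
        List.foldl_cons, List.foldl_map]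
      simp only [Nat.succ_eq_add_one, List.getD_cons_succ, List.getD_cons_zero, Nat.zero_add]
      have h0 : (if b - a - 1 > c then b - a - 1 else c) = max c (b - a - 1) := by
        split_ifs <;> omega
      rw [h0]
      have := ih (c := max c (b - a - 1))
      simpa [gmRun, List.getD_cons_succ, List.getD_cons_zero] using this

theorem mem_squash {x : Int} {l : List Int} : x ∈ squash l ↔ x ∈ l := by
  induction l with
  | nil => simp [squash]
  | cons a t ih =>
    cases t with
    | nil => simp [squash]
    | cons b u =>
      by_cases h : a = b
      · subst h
        rw [show squash (a :: a :: u) = squash (a :: u) from by simp [squash], ih]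
        simp
      · simp only [squash, if_neg h, List.mem_cons]
        rw [List.mem_cons] at ih
        rw [ih]

theorem squash_pairwise_lt {l : List Int} (h : l.Pairwise (· ≤ ·)) :
    (squash l).Pairwise (· < ·) := by
  induction l with
  | nil => simp [squash]
  | cons a t ih =>
    cases t with
    | nil => simp [squash]
    | cons b u =>
      rw [List.pairwise_cons] at h
      obtain ⟨ha, hbu⟩ := h
      by_cases hab : a = b
      · simpa [squash, hab] using ih hbu
      · have hlt : a < b := lt_of_le_of_ne (ha b (by simp)) hab
        simp only [squash, if_neg hab]
        refine List.pairwise_cons.mpr ⟨?_, ih hbu⟩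
        intro x hx
        have hxmem : x ∈ b :: u := mem_squash.mp hx
        rcases List.mem_cons.mp hxmem with h1 | h1
        · omega
        · have := (List.pairwise_cons.mp hbu).1 x h1
          omega

theorem sorted_set_eq_squash_sorted (xs : List Int) :
    PySem.List.sorted (PySem.Set.ofList xs) (fun x => x) false
      = squash (PySem.List.sorted xs (fun x => x) false) := by
  have hsq := squash_pairwise_lt
    (l := PySem.List.sorted xs (fun x => x) false) (PySem.List.sorted_pairwise xs (fun x => x))
  refine PySem.List.sorted_eq_of_perm_of_pairwise_lt _ _ _ ?_ hsq
  refine (List.perm_ext_iff_of_nodup (hsq.imp fun h => ne_of_lt h) (PySem.Set.nodup_ofList xs)).mpr ?_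
  intro x
  rw [mem_squash, PySem.List.mem_sorted, PySem.Set.mem_ofList]

theorem foldl_max_gaps (l : List Int) (c : Int) :
    (gaps l).foldl max c = gmRun c l := by
  induction l generalizing c with
  | nil => rfl
  | cons a t ih =>
    cases t with
    | nil => rfl
    | cons b u => simpa [gaps, gmRun] using ih (c := max c (b - a - 1))

theorem foldl_max_shift (u : List Int) (c1 c2 : Int) :
    u.foldl max (max c1 c2) = max c1 (u.foldl max c2) := by
  induction u generalizing c2 with
  | nil => rfl
  | cons x t ih => simpa [max_assoc] using ih (c2 := max c2 x)

theorem gaps_append (xs : List Int) (a b : Int) (ys : List Int) :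
    gaps ((xs ++ [a]) ++ b :: ys) = gaps (xs ++ [a]) ++ (b - a - 1) :: gaps (b :: ys) := by
  induction xs with
  | nil => simp [gaps]
  | cons x xs ih =>
    cases xs with
    | nil => simp [gaps]
    | cons y xs' => simpa [gaps] using ih

theorem getLast?_of_max {d : List Int} {a : Int} (hp : d.Pairwise (· < ·))
    (hm : a ∈ d) (hmax : ∀ y ∈ d, y ≤ a) : d.getLast? = some a := by
  induction d with
  | nil => simp at hm
  | cons x t ih =>
    rw [List.pairwise_cons] at hp
    cases t with
    | nil =>
      simp at hm
      simp [hm]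
    | cons z u =>
      have hat : a ∈ z :: u := by
        rcases List.mem_cons.mp hm with h | h
        · exfalso
          have hxa : x < z := hp.1 z (by simp)
          have := hmax z (by simp)
          omega
        · exact h
      rw [List.getLast?_cons_cons]
      exact ih hp.2 hat (fun y hy => hmax y (List.mem_cons_of_mem x hy))

theorem head?_of_min {d : List Int} {b : Int} (hp : d.Pairwise (· < ·))
    (hm : b ∈ d) (hmin : ∀ y ∈ d, b ≤ y) : d.head? = some b := by
  cases d with
  | nil => simp at hm
  | cons x t =>
    rw [List.pairwise_cons] at hp
    have : b = x := by
      rcases List.mem_cons.mp hm with h | h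
      · exact h
      · have h1 := hp.1 b h
        have h2 := hmin x (by simp)
        omega
    simp [this]

theorem gmRun_split (dL dR : List Int) (a b : Int)
    (hL : dL.getLast? = some a) (hR : dR.head? = some b) (hab : a < b) :
    gmRun 0 (dL ++ dR) = max (max (b - a - 1) (gmRun 0 dL)) (gmRun 0 dR) := by
  obtain ⟨xs, rfl⟩ := List.getLast?_eq_some_iff.mp hL
  obtain ⟨ys, rfl⟩ : ∃ ys, dR = b :: ys := by
    cases dR with
    | nil => simp at hR
    | cons z u => exact ⟨u, by simpa using (by simpa using hR : z = b) ▸ rfl⟩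
  calc gmRun 0 ((xs ++ [a]) ++ b :: ys)
      = (gaps ((xs ++ [a]) ++ b :: ys)).foldl max 0 := (foldl_max_gaps _ _).symm
    _ = ((gaps (xs ++ [a]) ++ (b - a - 1) :: gaps (b :: ys))).foldl max 0 := by
          rw [gaps_append]
    _ = ((b - a - 1) :: gaps (b :: ys)).foldl max ((gaps (xs ++ [a])).foldl max 0) :=
          List.foldl_append
    _ = (gaps (b :: ys)).foldl max (max ((gaps (xs ++ [a])).foldl max 0) (b - a - 1)) := rfl
    _ = max ((gaps (xs ++ [a])).foldl max 0) ((gaps (b :: ys)).foldl max (b - a - 1)) :=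
          foldl_max_shift _ _ _
    _ = max ((gaps (xs ++ [a])).foldl max 0) ((gaps (b :: ys)).foldl max (max (b - a - 1) 0)) := by
          rw [show max (b - a - 1) 0 = b - a - 1 from by omega]
    _ = max ((gaps (xs ++ [a])).foldl max 0) (max (b - a - 1) ((gaps (b :: ys)).foldl max 0)) := by
          rw [foldl_max_shift]
    _ = max (max (b - a - 1) ((gaps (xs ++ [a])).foldl max 0)) ((gaps (b :: ys)).foldl max 0) := by
          omega
    _ = max (max (b - a - 1) (gmRun 0 (xs ++ [a]))) (gmRun 0 (b :: ys)) := by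
          rw [foldl_max_gaps, foldl_max_gaps]

theorem filter_split_sorted (mid : Int) : ∀ (d : List Int), d.Pairwise (· < ·) →
    d.filter (fun v => decide (v ≤ mid)) ++ d.filter (fun v => decide (mid < v)) = d := by
  intro d
  induction d with
  | nil => intro _; rfl
  | cons x t iht =>
    intro hp
    rw [List.pairwise_cons] at hp
    by_cases hx : x ≤ mid
    · rw [List.filter_cons_of_pos (by simpa using hx),
        List.filter_cons_of_neg (by simp; omega), List.cons_append, iht hp.2]
    · rw [List.filter_cons_of_neg (by simpa using hx),
        List.filter_cons_of_pos (by simp; omega)]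
      have htnil : t.filter (fun v => decide (v ≤ mid)) = [] := by
        rw [List.filter_eq_nil_iff]
        intro y hy
        have := hp.1 y hy
        simp only [decide_eq_true_eq]
        omega
      have htall : t.filter (fun v => decide (mid < v)) = t := by
        rw [List.filter_eq_self]
        intro y hy
        have := hp.1 y hy
        simp only [decide_eq_true_eq]
        omega
      rw [htnil, htall, List.nil_append]

theorem gmRun_flat {d : List Int} {lo : Int} (h : ∀ x ∈ d, x = lo) (hp : d.Pairwise (· < ·)) :
    gmRun 0 d = 0 := by
  cases d with
  | nil => rfl
  | cons x t =>
    cases t with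
    | nil => rfl
    | cons y u =>
      exfalso
      have hx := h x (by simp)
      have hy := h y (by simp)
      have := (List.pairwise_cons.mp hp).1 y (by simp)
      omega

theorem gapBisect_eq_gmRun (n : Nat) : ∀ (lo hi : Int) (vals d : List Int),
    (hi - lo).toNat ≤ n →
    d.Pairwise (· < ·) →
    (∀ x : Int, x ∈ d ↔ x ∈ vals) →
    lo ∈ vals → hi ∈ vals →
    (∀ v ∈ vals, lo ≤ v ∧ v ≤ hi) →
    gapBisect lo hi vals = gmRun 0 d := by
  induction n with
  | zero =>
    intro lo hi vals d hn hp hmem hlo hhi hbd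
    have hle : hi ≤ lo := by
      have h1 := (hbd lo hlo).1
      omega
    rw [gapBisect, if_pos hle]
    refine (gmRun_flat (lo := lo) ?_ hp).symm
    intro x hx
    have := hbd x ((hmem x).mp hx)
    omega
  | succ n ih =>
    intro lo hi vals d hn hp hmem hlo hhi hbd
    by_cases hle : hi ≤ lo
    · rw [gapBisect, if_pos hle]
      refine (gmRun_flat (lo := lo) ?_ hp).symm
      intro x hx
      have := hbd x ((hmem x).mp hx)
      omega
    · rw [gapBisect, if_neg hle]
      dsimp only
      have hlh : lo < hi := by omega
      have hmid1 : lo ≤ PySem.Int.floordiv (lo + hi) 2 := by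
        rw [PySem.Int.floordiv_eq_ediv_of_pos (by norm_num)]; omega
      have hmid2 : PySem.Int.floordiv (lo + hi) 2 < hi := by
        rw [PySem.Int.floordiv_eq_ediv_of_pos (by norm_num)]; omega
      set mid := PySem.Int.floordiv (lo + hi) 2 with hmid
      set left := vals.filter fun v => decide (v ≤ mid) with hleft
      set right := vals.filter fun v => decide (mid < v) with hright
      have hlol : lo ∈ left := by
        rw [hleft, List.mem_filter]; exact ⟨hlo, by simpa using hmid1⟩
      have hhir : hi ∈ right := by
        rw [hright, List.mem_filter]; exact ⟨hhi, by simpa using hmid2⟩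
      split
      case _ a b ha hb =>
        -- facts about a and b
        have hamem : a ∈ left := PySem.List.max?_mem ha
        have hbmem : b ∈ right := PySem.List.min?_mem hb
        have hamax : ∀ y ∈ left, y ≤ a := fun y hy => PySem.List.max?_isMax ha y hy
        have hbmin : ∀ y ∈ right, b ≤ y := fun y hy => PySem.List.min?_isMin hb y hy
        have hamid : a ≤ mid := by
          have := (List.mem_filter.mp (hleft ▸ hamem)).2; simpa using this
        have hbmid : mid < b := by
          have := (List.mem_filter.mp (hright ▸ hbmem)).2; simpa using this
        have havals : a ∈ vals := (List.mem_filter.mp (hleft ▸ hamem)).1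
        have hbvals : b ∈ vals := (List.mem_filter.mp (hright ▸ hbmem)).1
        -- the split of d
        set dL := d.filter (fun v => decide (v ≤ mid)) with hdL
        set dR := d.filter (fun v => decide (mid < v)) with hdR
        have hdLp : dL.Pairwise (· < ·) := hp.sublist List.filter_sublist
        have hdRp : dR.Pairwise (· < ·) := hp.sublist List.filter_sublist
        have hdLmem : ∀ x : Int, x ∈ dL ↔ x ∈ left := by
          intro x
          rw [hdL, hleft, List.mem_filter, List.mem_filter, hmem]
        have hdRmem : ∀ x : Int, x ∈ dR ↔ x ∈ right := by
          intro x
          rw [hdR, hright, List.mem_filter, List.mem_filter, hmem]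
        have hsplit : dL ++ dR = d := filter_split_sorted mid d hp
        -- a is the last of dL, b the head of dR
        have hLlast : dL.getLast? = some a := by
          refine getLast?_of_max hdLp ((hdLmem a).mpr hamem) ?_
          intro y hy
          exact hamax y ((hdLmem y).mp hy)
        have hRhead : dR.head? = some b := by
          refine head?_of_min hdRp ((hdRmem b).mpr hbmem) ?_
          intro y hy
          exact hbmin y ((hdRmem y).mp hy)
        -- recursive calls
        have hrec1 : gapBisect lo a left = gmRun 0 dL := by
          refine ih lo a left dL ?_ hdLp hdLmem hlol hamem ?_
          · omega
          · intro v hv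
            have h1 := (hbd v (List.mem_filter.mp (hleft ▸ hv)).1).1
            exact ⟨h1, hamax v hv⟩
        have hrec2 : gapBisect b hi right = gmRun 0 dR := by
          refine ih b hi right dR ?_ hdRp hdRmem hbmem hhir ?_
          · omega
          · intro v hv
            have h2 := (hbd v (List.mem_filter.mp (hright ▸ hv)).1).2
            exact ⟨hbmin v hv, h2⟩
        rw [hrec1, hrec2, ← hsplit, gmRun_split dL dR a b hLlast hRhead (by omega)]
      case _ h =>
        -- impossible: left and right are nonempty, so max?/min? are both some
        exfalso
        obtain ⟨a, ha⟩ : ∃ a, PySem.List.max? left (fun y => y) = some a := by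
          cases hc : PySem.List.max? left (fun y => y) with
          | none =>
            exfalso
            rw [PySem.List.max?_eq_none_iff] at hc
            rw [hc] at hlol; simp at hlol
          | some a => exact ⟨a, rfl⟩
        obtain ⟨b, hb⟩ : ∃ b, PySem.List.min? right (fun y => y) = some b := by
          cases hc : PySem.List.min? right (fun y => y) with
          | none =>
            exfalso
            rw [PySem.List.min?_eq_none_iff] at hc
            rw [hc] at hhir; simp at hhir
          | some b => exact ⟨b, rfl⟩
        exact h a b ha hb

-- ===== VERDICT (by name: the statement is the Claim_ definition above) =====
theorem calculate_largest_consecutive_gap_spec : Claim_equal_calculate_largest_consecutive_gap := by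
  intro xs _
  show calculate_largest_consecutive_gap xs = calculate_largest_consecutive_gap_alt xs
  by_cases hlen : xs.length < 2
  · rw [calculate_largest_consecutive_gap, calculate_largest_consecutive_gap_alt,
      if_pos hlen, if_pos hlen]
  · rw [calculate_largest_consecutive_gap, calculate_largest_consecutive_gap_alt,
      if_neg hlen, if_neg hlen]
    have hne : xs ≠ [] := by
      intro h; rw [h] at hlen; simp at hlen
    obtain ⟨lo, hlo⟩ : ∃ lo, PySem.List.min? xs (fun y => y) = some lo := by
      cases hc : PySem.List.min? xs (fun y => y) with
      | none => exact absurd ((PySem.List.min?_eq_none_iff _ _).mp hc) hne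
      | some lo => exact ⟨lo, rfl⟩
    obtain ⟨hi, hhi⟩ : ∃ hi, PySem.List.max? xs (fun y => y) = some hi := by
      cases hc : PySem.List.max? xs (fun y => y) with
      | none => exact absurd ((PySem.List.max?_eq_none_iff _ _).mp hc) hne
      | some hi => exact ⟨hi, rfl⟩
    rw [hlo, hhi]
    set d := squash (PySem.List.sorted xs (fun x => x) false) with hd
    have hdp : d.Pairwise (· < ·) :=
      squash_pairwise_lt (PySem.List.sorted_pairwise xs (fun x => x))
    have hdm : ∀ x : Int, x ∈ d ↔ x ∈ xs := by
      intro x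
      rw [hd, mem_squash, PySem.List.mem_sorted]
    have hA : (PySem.List.pyRange 0 ((d.length : Int) - 1) 1).foldl
        (fun max_gap i =>
          let gap := PySem.List.pyGetD d (i + 1) 0 - PySem.List.pyGetD d i 0 - 1
          if gap > max_gap then gap else max_gap) 0 = gmRun 0 d := by
      rw [PySem.List.pyRange_one]
      have hcast : (((d.length : Int) - 1) - 0).toNat = d.length - 1 := by omega
      rw [hcast, List.foldl_map]
      rw [← idx_foldl_eq_gmRun d 0]
      apply PySem.List.foldl_congr_mem
      intro m k _
      have h2 : (0 : Int) + (k : Int) = ((k : Nat) : Int) := by ring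
      simp only [h2]
      rw [show ((k : Nat) : Int) + 1 = ((k + 1 : Nat) : Int) from by push_cast; ring]
      simp only [PySem.List.pyGetD_natCast]
    rw [sorted_set_eq_squash_sorted, ← hd, hA]
    exact (gapBisect_eq_gmRun (hi - lo).toNat lo hi xs d le_rfl hdp hdm
      (PySem.List.min?_mem hlo) (PySem.List.max?_mem hhi)
      (fun v hv => ⟨PySem.List.min?_isMin hlo v hv, PySem.List.max?_isMax hhi v hv⟩)).symm
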